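-- pv_equiv track=rewrite | github.com/pranithbottu/Python_Work | midterm.py | string_my_one_true_love
-- ===== SOURCE A (Python) =====
-- def string_my_one_true_love(the_string):
--     letters = get_letters(the_string)
--     counts = []
--     for i in range(0, len(letters)):
--         temp = the_string.count(letters[i])
--         counts.append(temp)
--     if len(set(counts)) > 2:
--         return False
--     if len(set(counts)) == 1:
--         return True
--     numbers = get_nums(counts)
--     instances = [0, 0]
--     for i,j in enumerate(counts):
--         if j == numbers[0]:
--             instances[0]+=1
--         elif j == numbers[1]:
--             instances[1]+=1
--     if instances[0] > 1 and instances[1] > 1: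
--         return False
--     else:
--         return True
--
-- def get_letters(string):
--     letters = []
--     for i,j in enumerate(string):
--         if j not in letters:
--             letters.append(j)
--     return letters
--
-- def get_nums(numbers):
--     nums = []
--     for i,j in enumerate(numbers):
--         if j not in nums:
--             nums.append(j)
--     return nums
-- ===== SOURCE B (Python) =====
-- def string_my_one_true_love(the_string):
--     # Sort the characters, read off run lengths, sort those, and decide from
--     # the order statistics of the sorted run-length list.
--     runs = []
--     prev = None
--     for ch in sorted(the_string):
--         if runs and ch == prev:
--             runs[-1] += 1
--         else:
--             runs.append(1)
--         prev = ch
--     r = sorted(runs)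
--     if not r or r[0] == r[-1]:
--         return True
--     lo = r.count(r[0])
--     hi = r.count(r[-1])
--     if lo + hi != len(r):
--         return False
--     return lo == 1 or hi == 1
-- ===== Notes on version B (the rewrite author's own statement) =====
-- stated objective: alternative
-- what changed: Sort-then-scan replaces counting machinery: B sorts the characters, reads letter frequencies off as run lengths of the sorted list, sorts those run lengths, and decides purely from order statistics (r[0], r[-1], their counts vs len(r)) of that sorted list, instead of A's per-distinct-letter str.count scans, set-of-counts size test and numbers[0]/numbers[1] instance tally.
import Mathlib
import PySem

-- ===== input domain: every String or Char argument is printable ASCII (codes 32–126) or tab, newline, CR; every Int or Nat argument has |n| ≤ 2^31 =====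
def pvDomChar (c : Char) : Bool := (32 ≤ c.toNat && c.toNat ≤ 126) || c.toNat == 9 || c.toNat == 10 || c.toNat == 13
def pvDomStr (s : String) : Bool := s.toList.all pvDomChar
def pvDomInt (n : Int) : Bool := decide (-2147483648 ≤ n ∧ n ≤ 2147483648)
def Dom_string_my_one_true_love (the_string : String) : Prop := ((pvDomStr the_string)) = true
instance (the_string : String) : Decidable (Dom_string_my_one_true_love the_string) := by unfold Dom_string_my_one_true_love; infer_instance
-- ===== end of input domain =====

-- B sorts the characters, reads frequencies off as run lengths, sorts those, and decides from
-- order statistics of the sorted run-length list instead of A's per-letter count scans and tallies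
-- (objective: alternative).

-- ===== PORT A =====
-- helper get_letters: ordered first-occurrence dedup of the string's characters
def pvGetLetters (string : List Char) : List Char :=
  string.foldl (fun letters j => if letters.contains j then letters else letters ++ [j]) []

-- helper get_nums: ordered first-occurrence dedup of the counts list
def pvGetNums (numbers : List Int) : List Int :=
  numbers.foldl (fun nums j => if nums.contains j then nums else nums ++ [j]) []

def string_my_one_true_love (the_string : String) : Bool :=
  let s := the_string.toList
  let letters := pvGetLetters s
  -- for i in range(0, len(letters)): counts.append(the_string.count(letters[i]))
  -- (letters.getD i ' ' is exact: every i ∈ range(len(letters)) is in range)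
  let counts : List Int := (List.range letters.length).foldl
    (fun counts i => counts ++ [((PySem.Chars.count s [letters.getD i ' '] : Nat) : Int)]) []
  if PySem.Set.len (PySem.Set.ofList counts) > 2 then false
  else if PySem.Set.len (PySem.Set.ofList counts) == 1 then true
  else
    let numbers := pvGetNums counts
    let instances := counts.foldl
      (fun (p : Int × Int) j =>
        if j == numbers.getD 0 0 then (p.1 + 1, p.2)
        else if j == numbers.getD 1 0 then (p.1, p.2 + 1)
        else p) (0, 0)
    if instances.1 > 1 ∧ instances.2 > 1 then false else true

-- ===== PORT B =====
-- runs[-1] += 1 (exact: only applied when runs is nonempty)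
def pvBumpLast (l : List Int) : List Int := l.dropLast ++ [l.getLastD 0 + 1]

def string_my_one_true_love_alt (the_string : String) : Bool :=
  -- for ch in sorted(the_string): if runs and ch == prev: runs[-1] += 1 else: runs.append(1); prev = ch
  let runs : List Int :=
    ((PySem.List.sorted the_string.toList (fun c => c) false).foldl
      (fun (p : List Int × Option Char) ch =>
        if p.1 ≠ [] ∧ p.2 = some ch then (pvBumpLast p.1, some ch) else (p.1 ++ [1], some ch))
      ([], none)).1
  let r := PySem.List.sorted runs (fun x => x) false
  match r with
  | [] => true                                   -- if not r: return True
  | first :: _ =>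
    let last := r.getLastD 0                     -- r[-1] (exact: r ≠ [])
    if first == last then true                   -- r[0] == r[-1]
    else
      let lo := (r.count first : Int)            -- r.count(r[0])
      let hi := (r.count last : Int)             -- r.count(r[-1])
      if lo + hi ≠ (r.length : Int) then false
      else lo == 1 || hi == 1

-- ===== PRECONDITION & SPEC =====
def Spec_string_my_one_true_love (the_string : String) (out : Bool) : Prop := out = string_my_one_true_love_alt the_string
instance (the_string : String) (out : Bool) : Decidable (Spec_string_my_one_true_love the_string out) := by unfold Spec_string_my_one_true_love; infer_instance

-- ===== CLAIM =====
def Claim_equal_string_my_one_true_love : Prop := ∀ (the_string : String), Dom_string_my_one_true_love the_string → Spec_string_my_one_true_love the_string (string_my_one_true_love the_string)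

-- ===== LEMMAS AND PROOFS =====

-- run-length specification: adjacent run lengths, peeling one maximal run at a time
def pvRlSpec : List Char → List Int
  | [] => []
  | c :: t => (1 + ((t.takeWhile (· == c)).length : Int)) :: pvRlSpec (t.dropWhile (· == c))
termination_by l => l.length
decreasing_by
  simp only [List.length_cons]
  exact Nat.lt_succ_of_le (List.length_dropWhile_le _ _)

-- single-character substring count is element count
theorem pv_count_go_single (c : Char) (s : List Char) :
    ∀ fuel acc, s.length ≤ fuel → PySem.Chars.count.go [c] fuel s acc = acc + s.count c := by
  induction s with
  | nil => intro fuel acc h; cases fuel <;> simp [PySem.Chars.count.go]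
  | cons h t ih =>
    intro fuel acc hle
    cases fuel with
    | zero => simp at hle
    | succ f =>
      rw [PySem.Chars.count.go]
      simp only [List.isPrefixOf, Bool.and_true, List.length_cons] at *
      by_cases hc : c = h
      · subst hc
        simp only [beq_self_eq_true, if_true, List.length_nil, Nat.zero_add, List.drop_one, List.tail_cons]
        rw [ih f (acc + 1) (by omega)]
        simp
        omega
      · have hb : (c == h) = false := by simpa using hc
        rw [hb]
        simp only [Bool.false_eq_true, if_false]
        rw [ih f acc (by omega)]
        simp [Ne.symm hc]

theorem pv_count_single (s : List Char) (c : Char) : PySem.Chars.count s [c] = s.count c := by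
  simp [PySem.Chars.count, pv_count_go_single c s s.length 0 le_rfl]

theorem pv_getLetters_eq (s : List Char) : pvGetLetters s = PySem.Set.ofList s := rfl

theorem pv_map_range_getD (l : List Char) (d : Char) (g : Char → Int) :
    (List.range l.length).map (fun i => g (l.getD i d)) = l.map g := by
  apply List.ext_getElem
  · simp
  · intro i h1 h2
    simp at h1 h2 ⊢
    simp [List.getElem?_eq_getElem (by simpa using h2)]

-- A's counts list = the count of each distinct letter, in first-occurrence order
theorem pv_counts_eq (s : List Char) :
    (List.range (pvGetLetters s).length).foldl
      (fun counts i => counts ++ [((PySem.Chars.count s [(pvGetLetters s).getD i ' '] : Nat) : Int)]) []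
    = (PySem.Set.ofList s : List Char).map (fun c => ((s.count c : Nat) : Int)) := by
  rw [PySem.List.foldl_append_singleton_eq_map]
  rw [pv_getLetters_eq]
  have := pv_map_range_getD (PySem.Set.ofList s) ' ' (fun c => ((s.count c : Nat) : Int))
  simpa [pv_count_single] using this

theorem pv_fold_run (t : List Char) : ∀ (acc : List Int) (k : Int) (c : Char),
    (t.foldl (fun (p : List Int × Option Char) ch =>
        if p.1 ≠ [] ∧ p.2 = some ch then (pvBumpLast p.1, some ch) else (p.1 ++ [1], some ch))
      (acc ++ [k], some c)).1
    = acc ++ (k + ((t.takeWhile (· == c)).length : Int)) :: pvRlSpec (t.dropWhile (· == c)) := by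
  induction t with
  | nil => intro acc k c; simp [pvRlSpec]
  | cons x t ih =>
    intro acc k c
    simp only [List.foldl_cons]
    by_cases hc : x = c
    · subst hc
      rw [if_pos (by simp)]
      have hb : pvBumpLast (acc ++ [k]) = acc ++ [k + 1] := by
        simp [pvBumpLast]
      rw [hb, ih acc (k + 1) x]
      simp [List.takeWhile, List.dropWhile]
      ring_nf
    · have hcc : ((x : Char) == c) = false := by simpa using hc
      rw [if_neg (by simp [Ne.symm hc])]
      have : acc ++ [k] ++ [1] = (acc ++ [k]) ++ [1] := by simp
      rw [ih (acc ++ [k]) 1 x]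
      simp [List.takeWhile, List.dropWhile, hcc, pvRlSpec]

theorem pv_fold_eq_rlSpec (t : List Char) :
    ((t.foldl (fun (p : List Int × Option Char) ch =>
        if p.1 ≠ [] ∧ p.2 = some ch then (pvBumpLast p.1, some ch) else (p.1 ++ [1], some ch))
      ([], none)).1) = pvRlSpec t := by
  cases t with
  | nil => simp [pvRlSpec]
  | cons x t =>
    simp only [List.foldl_cons, if_neg (by simp : ¬(([] : List Int) ≠ [] ∧ (none : Option Char) = some x))]
    have := pv_fold_run t [] 1 x
    simp at this ⊢
    rw [this]
    simp [pvRlSpec]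

theorem pv_not_mem_dropWhile (t : List Char) (c : Char) (hs : t.Pairwise (· ≤ ·))
    (hge : ∀ y ∈ t, c ≤ y) : c ∉ t.dropWhile (· == c) := by
  induction t with
  | nil => simp
  | cons y r ih =>
    rw [List.pairwise_cons] at hs
    by_cases hy : y = c
    · subst hy
      simp only [List.dropWhile_cons, beq_self_eq_true, if_true]
      exact ih hs.2 (fun z hz => le_trans (hge y (by simp)) (hs.1 z hz))
    · have hb : ((y : Char) == c) = false := by simpa using hy
      simp only [List.dropWhile_cons, hb, Bool.false_eq_true, if_false]
      intro hmem
      rcases List.mem_cons.1 hmem with h | h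
      · exact hy h.symm
      · have h1 : y ≤ c := hs.1 c h
        have h2 : c ≤ y := hge y (by simp)
        exact hy (le_antisymm h1 h2)

theorem pv_foldl_add_skip (l : List Char) : ∀ s : List Char, (∀ y ∈ l, y ∈ s) →
    l.foldl PySem.Set.add s = s := by
  induction l with
  | nil => intro s _; rfl
  | cons y r ih =>
    intro s h
    simp only [List.foldl_cons]
    have hys : y ∈ s := h y (by simp)
    have : PySem.Set.add s y = s := by
      simp [PySem.Set.add, hys]
    rw [this]
    exact ih s (fun z hz => h z (by simp [hz]))

theorem pv_foldl_add_cons (l : List Char) : ∀ (s : List Char) (x : Char), x ∉ l →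
    l.foldl PySem.Set.add (x :: s) = x :: l.foldl PySem.Set.add s := by
  induction l with
  | nil => intro s x _; rfl
  | cons y r ih =>
    intro s x hx
    have hxy : y ≠ x := fun h => hx (by simp [h])
    simp only [List.foldl_cons]
    have : PySem.Set.add (x :: s) y = x :: PySem.Set.add s y := by
      simp [PySem.Set.add, hxy]
      split_ifs <;> simp
    rw [this, ih _ x (fun h => hx (by simp [h]))]

theorem pv_rlSpec_sorted : ∀ (n : Nat) (t : List Char), t.length ≤ n → t.Pairwise (· ≤ ·) →
    pvRlSpec t = (PySem.Set.ofList t : List Char).map (fun c => ((t.count c : Nat) : Int)) := by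
  intro n
  induction n with
  | zero => intro t ht _; rw [List.length_eq_zero_iff.1 (Nat.le_zero.1 ht)]; simp [pvRlSpec]
  | succ n ih =>
    intro t ht hs
    cases t with
    | nil => simp [pvRlSpec]
    | cons c t' =>
      rw [List.pairwise_cons] at hs
      set tw := t'.takeWhile (· == c) with htw
      set dw := t'.dropWhile (· == c) with hdw
      have hsplit : tw ++ dw = t' := List.takeWhile_append_dropWhile
      have htwc : ∀ y ∈ tw, y = c := by
        intro y hy
        have := List.mem_takeWhile_imp hy
        simpa using this
      have hdwsub : dw.Sublist t' := List.dropWhile_sublist _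
      have hdws : dw.Pairwise (· ≤ ·) := hs.2.sublist hdwsub
      have hcndw : c ∉ dw := pv_not_mem_dropWhile t' c hs.2 hs.1
      -- Set.ofList (c :: t') = c :: Set.ofList dw
      have hset : (PySem.Set.ofList (c :: t') : List Char) = c :: PySem.Set.ofList dw := by
        show (c :: t').foldl PySem.Set.add [] = c :: dw.foldl PySem.Set.add []
        rw [← hsplit]
        simp only [List.foldl_cons, List.foldl_append]
        have h1 : PySem.Set.add [] c = [c] := rfl
        rw [h1, pv_foldl_add_skip tw [c] (fun y hy => by simp [htwc y hy]),
            pv_foldl_add_cons dw [] c hcndw]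
      -- counts
      have hcount_c : (c :: t').count c = 1 + tw.length := by
        rw [← hsplit]
        simp [List.count_append]
        rw [List.count_eq_zero.2 hcndw, List.count_eq_length.2 (fun b hb => (htwc b hb).symm)]
        omega
      have hcount_x : ∀ x ∈ (PySem.Set.ofList dw : List Char), (c :: t').count x = dw.count x := by
        intro x hx
        have hxdw : x ∈ dw := (PySem.Set.mem_ofList _ _).1 hx
        have hxc : x ≠ c := fun h => hcndw (h ▸ hxdw)
        rw [← hsplit]
        have hcx : ¬ c = x := fun h => hxc h.symm
        simp [List.count_append, hcx]
        rw [List.count_eq_zero.2 (fun h => hxc (htwc x h))]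
      have hlen : dw.length ≤ n := by
        have hd := List.length_dropWhile_le (· == c) t'
        rw [← hdw] at hd
        simp only [List.length_cons] at ht
        omega
      rw [pvRlSpec, hset]
      simp only [List.map_cons]
      congr 1
      · rw [hcount_c]; push_cast; ring
      · rw [ih dw hlen hdws]
        exact (List.map_congr_left (fun x hx => by rw [hcount_x x hx])).symm

theorem pv_head_le (x : Int) (l : List Int) (h : (x :: l).Pairwise (· ≤ ·)) :
    ∀ y ∈ x :: l, x ≤ y := by
  rw [List.pairwise_cons] at h
  intro y hy
  rcases List.mem_cons.1 hy with h' | h'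
  · omega
  · exact h.1 y h'

theorem pv_le_last (l : List Int) (h : l.Pairwise (· ≤ ·)) (hne : l ≠ []) :
    ∀ y ∈ l, y ≤ l.getLastD 0 := by
  induction l with
  | nil => simp
  | cons x r ih =>
    intro y hy
    cases r with
    | nil => simp at hy; simp [hy]
    | cons z r' =>
      rw [List.getLastD_cons]
      rw [List.pairwise_cons] at h
      rcases List.mem_cons.1 hy with h' | h'
      · subst h'
        exact le_trans (h.1 z (by simp)) (ih h.2 (by simp) z (by simp))
      · exact ih h.2 (by simp) y h'

theorem pv_getLastD_mem (l : List Int) (hne : l ≠ []) : l.getLastD 0 ∈ l := by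
  cases l with
  | nil => simp at hne
  | cons x r =>
    have h1 : (x :: r).getLastD 0 = (x :: r).getLast (by simp) := by
      rw [List.getLastD_eq_getLast?, List.getLast?_eq_some_getLast (by simp)]
      rfl
    rw [h1]
    exact List.getLast_mem _

theorem pv_count_two (l : List Int) (a b : Int) (hab : a ≠ b)
    (h : ∀ x ∈ l, x = a ∨ x = b) : l.count a + l.count b = l.length := by
  induction l with
  | nil => simp
  | cons x r ih =>
    have hr := ih (fun z hz => h z (by simp [hz]))
    rcases h x (by simp) with hx | hx <;> subst hx <;>
      simp [hab, Ne.symm hab] <;> omega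

theorem pv_count_three (l : List Int) (a b v : Int) (hab : a ≠ b) (hav : a ≠ v) (hbv : b ≠ v) :
    l.count a + l.count b + l.count v ≤ l.length := by
  induction l with
  | nil => simp
  | cons x r ih =>
    simp only [List.count_cons, List.length_cons]
    by_cases h1 : x = a <;> by_cases h2 : x = b <;> by_cases h3 : x = v <;>
      simp_all <;> omega

theorem pv_mem_of_ofList_eq_pair (counts : List Int) (n0 n1 : Int)
    (h : (PySem.Set.ofList counts : List Int) = [n0, n1]) : n0 ∈ counts ∧ n1 ∈ counts ∧ n0 ≠ n1 := by
  have h0 : n0 ∈ (PySem.Set.ofList counts : List Int) := by rw [h]; simp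
  have h1 : n1 ∈ (PySem.Set.ofList counts : List Int) := by rw [h]; simp
  have hnd : (PySem.Set.ofList counts : List Int).Nodup := PySem.Set.nodup_ofList counts
  rw [h] at hnd
  refine ⟨?_, ?_, ?_⟩
  · simpa using (PySem.Set.mem_ofList counts n0).1 h0
  · simpa using (PySem.Set.mem_ofList counts n1).1 h1
  · simp at hnd; exact hnd

theorem pv_ofList_eq_nil {l : List Int} (h : (PySem.Set.ofList l : List Int) = []) : l = [] := by
  cases l with
  | nil => rfl
  | cons x t =>
    exfalso
    have hx : x ∈ (PySem.Set.ofList (x :: t) : List Int) := (PySem.Set.mem_ofList _ _).2 (by simp)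
    rw [h] at hx
    simp at hx

-- all elements of a nondecreasing list with equal head and last are equal

theorem pv_all_eq (first : Int) (rest : List Int) (hpw : (first :: rest).Pairwise (· ≤ ·))
    (hfl : first = (first :: rest).getLastD 0) : ∀ y ∈ first :: rest, y = first := by
  intro y hy
  have h1 := pv_head_le first rest hpw y hy
  have h2 := pv_le_last (first :: rest) hpw (by simp) y hy
  omega

theorem pv_instances_eq (n0 n1 : Int) (hne : n0 ≠ n1) (l : List Int) :
    ∀ a b : Int, l.foldl
      (fun (p : Int × Int) j =>
        if j == n0 then (p.1 + 1, p.2)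
        else if j == n1 then (p.1, p.2 + 1)
        else p) (a, b) = (a + l.count n0, b + l.count n1) := by
  induction l with
  | nil => intro a b; simp
  | cons j t ih =>
    intro a b
    simp only [List.foldl_cons]
    by_cases h0 : j = n0
    · subst h0
      rw [if_pos (by simp), ih (a + 1) b]
      simp [Prod.ext_iff, List.count_cons]
      omega
    · by_cases h1 : j = n1
      · subst h1
        rw [if_neg (by simpa using h0), if_pos (by simp), ih a (b + 1)]
        simp [Prod.ext_iff, h0]
        omega
      · rw [if_neg (by simpa using h0), if_neg (by simpa using h1), ih a b]
        simp [h0, h1]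

theorem pv_main (V : List Int) :
    (if PySem.Set.len (PySem.Set.ofList V) > 2 then false
     else if PySem.Set.len (PySem.Set.ofList V) == 1 then true
     else
       if (V.foldl
         (fun (p : Int × Int) j =>
           if j == (PySem.Set.ofList V : List Int).getD 0 0 then (p.1 + 1, p.2)
           else if j == (PySem.Set.ofList V : List Int).getD 1 0 then (p.1, p.2 + 1)
           else p) (0, 0)).1 > 1 ∧ (V.foldl
         (fun (p : Int × Int) j =>
           if j == (PySem.Set.ofList V : List Int).getD 0 0 then (p.1 + 1, p.2)
           else if j == (PySem.Set.ofList V : List Int).getD 1 0 then (p.1, p.2 + 1)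
           else p) (0, 0)).2 > 1 then false else true)
    = (match PySem.List.sorted V (fun x => x) false with
       | [] => true
       | first :: _ =>
         let r := PySem.List.sorted V (fun x => x) false
         let last := r.getLastD 0
         if first == last then true
         else
           let lo := (r.count first : Int)
           let hi := (r.count last : Int)
           if lo + hi ≠ (r.length : Int) then false
           else lo == 1 || hi == 1) := by
  have hperm : (PySem.List.sorted V (fun x => x) false).Perm V :=
    PySem.List.sorted_perm V (fun x => x) false
  have hpw : (PySem.List.sorted V (fun x => x) false).Pairwise (· ≤ ·) := by
    simpa using PySem.List.sorted_pairwise (xs := V) (key := fun x => x)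
  rcases hr : PySem.List.sorted V (fun x => x) false with _ | ⟨first, rest⟩
  · -- sorted V = [] so V = []
    have hV : V = [] := by
      have h := hperm; rw [hr] at h; exact h.symm.eq_nil
    subst hV
    decide
  · rw [hr] at hperm hpw
    have hfmem : first ∈ V := hperm.mem_iff.1 (by simp)
    have hlmem : (first :: rest).getLastD 0 ∈ V :=
      hperm.mem_iff.1 (pv_getLastD_mem _ (by simp))
    have hcnt : ∀ x, (first :: rest).count x = V.count x := fun x => hperm.count_eq x
    have hmemV : ∀ x, x ∈ V ↔ x ∈ (PySem.Set.ofList V : List Int) :=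
      fun x => (PySem.Set.mem_ofList V x).symm
    -- reduce the right-hand side (iota/zeta; definitional)
    change _ = (if first == (first :: rest).getLastD 0 then true
         else
           if ((first :: rest).count first : Int) + ((first :: rest).count ((first :: rest).getLastD 0) : Int)
               ≠ ((first :: rest).length : Int) then false
           else (((first :: rest).count first : Int) == 1 || (((first :: rest).count ((first :: rest).getLastD 0) : Int) == 1)))
    rcases hL : (PySem.Set.ofList V : List Int) with _ | ⟨n0, L1⟩
    · exact absurd (pv_ofList_eq_nil hL ▸ hfmem) (by simp)
    · rcases L1 with _ | ⟨n1, L2⟩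
      · -- exactly one distinct value: both sides true
        have hall : ∀ x ∈ V, x = n0 := by
          intro x hx
          have h := (hmemV x).1 hx
          rw [hL] at h
          simpa using h
        have hf : first = n0 := hall _ hfmem
        have hl : (first :: rest).getLastD 0 = n0 := hall _ hlmem
        rw [if_neg (show ¬(PySem.Set.len ([n0] : List Int) > 2) from by simp [PySem.Set.len]),
            if_pos (show (PySem.Set.len ([n0] : List Int) == 1) = true from by simp [PySem.Set.len]),
            if_pos (show ((first == (first :: rest).getLastD 0) : Bool) = true from by
              rw [hl, hf]; simp)]
      · rcases L2 with _ | ⟨n2, L3⟩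
        · -- exactly two distinct values
          obtain ⟨h0, h1, hne⟩ := pv_mem_of_ofList_eq_pair V n0 n1 hL
          have hall : ∀ x ∈ V, x = n0 ∨ x = n1 := by
            intro x hx
            have h := (hmemV x).1 hx
            rw [hL] at h
            simpa using h
          have hfl : first ≠ (first :: rest).getLastD 0 := by
            intro heq
            have hae := pv_all_eq first rest hpw heq
            exact hne ((hae n0 (hperm.mem_iff.2 h0)).trans (hae n1 (hperm.mem_iff.2 h1)).symm)
          have hfin : first = n0 ∨ first = n1 := hall _ hfmem
          have hlin : (first :: rest).getLastD 0 = n0 ∨ (first :: rest).getLastD 0 = n1 :=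
            hall _ hlmem
          have hsum : (first :: rest).count first + (first :: rest).count ((first :: rest).getLastD 0)
              = (first :: rest).length := by
            apply pv_count_two _ _ _ hfl
            intro x hx
            rcases hall x (hperm.mem_iff.1 hx) with h | h <;>
            rcases hfin with hf | hf <;> rcases hlin with hl | hl <;>
              first
              | (exact absurd (hf.trans hl.symm) hfl)
              | (left; omega)
              | (right; omega)
          have hc0 : 0 < V.count n0 := List.count_pos_iff.2 h0
          have hc1 : 0 < V.count n1 := List.count_pos_iff.2 h1
          rw [if_neg (show ¬(PySem.Set.len ([n0, n1] : List Int) > 2) from by simp [PySem.Set.len]),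
              if_neg (show ¬((PySem.Set.len ([n0, n1] : List Int) == 1) = true) from by
                simp [PySem.Set.len]),
              if_neg (show ¬((first == (first :: rest).getLastD 0) = true) from by simpa using hfl),
              if_neg (show ¬(((first :: rest).count first : Int) +
                  ((first :: rest).count ((first :: rest).getLastD 0) : Int)
                  ≠ ((first :: rest).length : Int)) from by push_cast [← hsum]; ring_nf; omega)]
          rw [show (([n0, n1] : List Int).getD 0 0) = n0 from rfl,
              show (([n0, n1] : List Int).getD 1 0) = n1 from rfl,
              pv_instances_eq n0 n1 hne V 0 0]
          simp only [zero_add]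
          rw [hcnt first, hcnt ((first :: rest).getLastD 0)]
          rcases hfin with hf | hf <;> rcases hlin with hl | hl
          · exact absurd (hf.trans hl.symm) hfl
          · rw [hl, hf]
            by_cases hb : (V.count n0 : Int) > 1 ∧ (V.count n1 : Int) > 1
            · rw [if_pos hb]
              have ha : ¬((V.count n0 : Int) = 1) := by omega
              have hbb : ¬((V.count n1 : Int) = 1) := by omega
              simp [ha, hbb]
            · rw [if_neg hb]
              have h := not_and_or.1 hb
              have hone : (V.count n0 : Int) = 1 ∨ (V.count n1 : Int) = 1 := by
                rcases h with h | h <;> [left; right] <;> omega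
              rcases hone with h | h <;> simp [h]
          · rw [hl, hf]
            by_cases hb : (V.count n0 : Int) > 1 ∧ (V.count n1 : Int) > 1
            · rw [if_pos hb]
              have ha : ¬((V.count n0 : Int) = 1) := by omega
              have hbb : ¬((V.count n1 : Int) = 1) := by omega
              simp [ha, hbb]
            · rw [if_neg hb]
              have h := not_and_or.1 hb
              have hone : (V.count n0 : Int) = 1 ∨ (V.count n1 : Int) = 1 := by
                rcases h with h | h <;> [left; right] <;> omega
              rcases hone with h | h <;> simp [h]
          · exact absurd (hf.trans hl.symm) hfl
        · -- at least three distinct values: both sides false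
          have hnd : (PySem.Set.ofList V : List Int).Nodup := PySem.Set.nodup_ofList V
          rw [hL] at hnd
          have h0 : n0 ∈ V := (hmemV n0).2 (by rw [hL]; simp)
          have h1 : n1 ∈ V := (hmemV n1).2 (by rw [hL]; simp)
          have h2 : n2 ∈ V := (hmemV n2).2 (by rw [hL]; simp)
          have hd01 : n0 ≠ n1 := by simp at hnd; tauto
          have hd02 : n0 ≠ n2 := by simp at hnd; tauto
          have hd12 : n1 ≠ n2 := by simp at hnd; tauto
          have hfl : first ≠ (first :: rest).getLastD 0 := by
            intro heq
            have hae := pv_all_eq first rest hpw heq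
            exact hd01 ((hae n0 (hperm.mem_iff.2 h0)).trans (hae n1 (hperm.mem_iff.2 h1)).symm)
          obtain ⟨v, hv, hvf, hvl⟩ :
              ∃ v, v ∈ V ∧ v ≠ first ∧ v ≠ (first :: rest).getLastD 0 := by
            by_cases e0 : n0 ≠ first ∧ n0 ≠ (first :: rest).getLastD 0
            · exact ⟨n0, h0, e0.1, e0.2⟩
            · by_cases e1 : n1 ≠ first ∧ n1 ≠ (first :: rest).getLastD 0
              · exact ⟨n1, h1, e1.1, e1.2⟩
              · push Not at e0 e1
                refine ⟨n2, h2, ?_, ?_⟩ <;>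
                · intro he
                  rcases Classical.em (n0 = first) with f0 | f0 <;>
                  rcases Classical.em (n1 = first) with f1 | f1 <;> omega
          have hvr : v ∈ first :: rest := hperm.mem_iff.2 hv
          have hvc : 0 < (first :: rest).count v := List.count_pos_iff.2 hvr
          have hle := pv_count_three (first :: rest) first ((first :: rest).getLastD 0) v
            hfl (Ne.symm hvf) (Ne.symm hvl)
          rw [if_pos (show PySem.Set.len ((n0 :: n1 :: n2 :: L3) : List Int) > 2 from by
                simp [PySem.Set.len]; omega),
              if_neg (show ¬((first == (first :: rest).getLastD 0) = true) from by simpa using hfl),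
              if_pos (show (((first :: rest).count first : Int) +
                  ((first :: rest).count ((first :: rest).getLastD 0) : Int)
                  ≠ ((first :: rest).length : Int)) from by omega)]


-- B's run lengths over the sorted characters are A's distinct-letter counts, up to permutation
theorem pv_runs_perm (s : List Char) :
    (pvRlSpec (PySem.List.sorted s (fun c => c) false)).Perm
      ((PySem.Set.ofList s : List Char).map (fun c => ((s.count c : Nat) : Int))) := by
  have hpw : (PySem.List.sorted s (fun c => c) false).Pairwise (· ≤ ·) := by
    simpa using PySem.List.sorted_pairwise (xs := s) (key := fun c => c)
  have hperm : (PySem.List.sorted s (fun c => c) false).Perm s :=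
    PySem.List.sorted_perm s (fun c => c) false
  rw [pv_rlSpec_sorted (PySem.List.sorted s (fun c => c) false).length _ le_rfl hpw]
  rw [List.map_congr_left
    (fun c _ => by simpa using congrArg (Nat.cast : Nat → Int) (hperm.count_eq c) :
      ∀ c ∈ (PySem.Set.ofList (PySem.List.sorted s (fun c => c) false) : List Char),
        (fun c => (((PySem.List.sorted s (fun c => c) false).count c : Nat) : Int)) c
          = (fun c => ((s.count c : Nat) : Int)) c)]
  apply List.Perm.map
  rw [List.perm_ext_iff_of_nodup (PySem.Set.nodup_ofList _) (PySem.Set.nodup_ofList _)]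
  intro a
  simp [PySem.Set.mem_ofList, hperm.mem_iff]

-- ===== VERDICT =====
theorem string_my_one_true_love_spec : Claim_equal_string_my_one_true_love := by
  intro the_string _
  unfold Spec_string_my_one_true_love string_my_one_true_love string_my_one_true_love_alt
  dsimp only
  rw [pv_counts_eq, pv_fold_eq_rlSpec]
  rw [PySem.List.sorted_eq_sorted_of_perm _ _ _ (fun a b h => h)
    (pv_runs_perm the_string.toList)]
  exact pv_main _
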